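-- pv_equiv track=rewrite | github.com/arthurmeirelessm/poc-selfmanage-agentcore-memorystrategy | src/pipeline_lambda.py | format_messages_for_prompt
-- ===== SOURCE A (Python) =====
-- def format_messages_for_prompt(messages: list) -> str:
--     conversation_xml = "<conversation>\n"
--     turn_number = 1
--
--     # Agrupa pares user + assistant
--     i = 0
--     while i < len(messages):
--         msg = messages[i]
--         role = msg.get("role", "").upper()
--
--         if role == "USER":
--             user_content = msg.get("content", "")
--             if isinstance(user_content, dict):
--                 user_content = user_content.get("text", "")
--
--             # Pega o assistant seguinte, se existir
--             assistant_content = ""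
--             if i + 1 < len(messages) and messages[i + 1].get("role", "").upper() == "ASSISTANT":
--                 assistant_content = messages[i + 1].get("content", "")
--                 if isinstance(assistant_content, dict):
--                     assistant_content = assistant_content.get("text", "")
--                 i += 1  # pula o assistant no próximo loop
--
--             conversation_xml += f"  <turn_{turn_number}>\n"
--             conversation_xml += f"    <user>{user_content}</user>\n"
--             conversation_xml += f"    <assistant>{assistant_content}</assistant>\n"
--             conversation_xml += f"  </turn_{turn_number}>\n"
--             turn_number += 1
--
--         i += 1
--
--     conversation_xml += "</conversation>"
--     return conversation_xml
-- ===== SOURCE B (Python) =====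
-- def format_messages_for_prompt(messages: list) -> str:
--     # Pass 1: pair up messages into (user, assistant) tuples.
--     def extract(msg):
--         c = msg.get("content", "")
--         if isinstance(c, dict):
--             c = c.get("text", "")
--         return c
--
--     pairs = []
--     pending = None  # user content awaiting its assistant reply
--     for msg in messages:
--         role = msg.get("role", "").upper()
--         if pending is not None and role == "ASSISTANT":
--             pairs.append((pending, extract(msg)))
--             pending = None
--             continue
--         if pending is not None:
--             pairs.append((pending, ""))
--             pending = None
--         if role == "USER":
--             pending = extract(msg)
--     if pending is not None:
--         pairs.append((pending, ""))
--
--     # Pass 2: render the numbered turns.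
--     body = "".join(
--         f"  <turn_{n}>\n    <user>{u}</user>\n"
--         f"    <assistant>{a}</assistant>\n  </turn_{n}>\n"
--         for n, (u, a) in enumerate(pairs, 1)
--     )
--     return "<conversation>\n" + body + "</conversation>"
-- ===== Notes on version B (the rewrite author's own statement) =====
-- stated objective: alternative
-- what changed: Replaces A's index-based while loop with messages[i+1] lookahead and a running turn counter by two staged passes: a first pass pairs messages into (user, assistant) tuples via a pending-user state, and a second pass renders the numbered XML turns with enumerate and join.
import Mathlib
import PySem

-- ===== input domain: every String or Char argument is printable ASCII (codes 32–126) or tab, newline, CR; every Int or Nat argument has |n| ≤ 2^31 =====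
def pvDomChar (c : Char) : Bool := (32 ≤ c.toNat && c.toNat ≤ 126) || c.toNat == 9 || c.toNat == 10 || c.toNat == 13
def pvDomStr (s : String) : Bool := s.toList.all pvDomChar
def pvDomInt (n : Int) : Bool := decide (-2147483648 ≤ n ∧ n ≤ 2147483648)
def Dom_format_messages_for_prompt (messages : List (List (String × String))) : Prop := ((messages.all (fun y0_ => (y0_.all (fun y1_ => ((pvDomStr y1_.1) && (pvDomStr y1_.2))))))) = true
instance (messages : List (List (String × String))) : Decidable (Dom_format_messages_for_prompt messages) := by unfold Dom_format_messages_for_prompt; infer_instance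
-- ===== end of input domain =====

-- B replaces A's index-based while loop (lookahead at messages[i+1] plus a running
-- turn counter) by two staged passes: pair up (user, assistant) tuples, then render
-- the numbered turns with enumerate + join (objective: alternative).
-- In the Lean types message values are strings, so Python's
-- "isinstance(content, dict)" branch never fires and is not ported.

-- ===== PORT A =====
-- the four += f-string lines of A's turn block
def pvATurn (turn : Int) (u a : String) : String :=
  ("  <turn_" ++ PySem.Int.toStr turn ++ ">\n") ++
  ("    <user>" ++ u ++ "</user>\n") ++
  ("    <assistant>" ++ a ++ "</assistant>\n") ++
  ("  </turn_" ++ PySem.Int.toStr turn ++ ">\n")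

-- A's while loop over index i, with the messages[i+1] lookahead (i += 1 skip)
def pvAGo : List (List (String × String)) → Int → String
  | [], _ => ""
  | m :: rest, turn =>
    let role := PySem.Str.upper ((PySem.Dict.ofList m).getD "role" "")
    if role = "USER" then
      let u := (PySem.Dict.ofList m).getD "content" ""
      match rest with
      | m2 :: rest2 =>
        if PySem.Str.upper ((PySem.Dict.ofList m2).getD "role" "") = "ASSISTANT" then
          pvATurn turn u ((PySem.Dict.ofList m2).getD "content" "") ++ pvAGo rest2 (turn + 1)
        else
          pvATurn turn u "" ++ pvAGo (m2 :: rest2) (turn + 1)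
      | [] => pvATurn turn u "" ++ pvAGo [] (turn + 1)
    else
      pvAGo rest turn
  termination_by msgs _ => msgs.length
  decreasing_by all_goals (simp only [List.length_cons, List.length_nil]; omega)

def format_messages_for_prompt (messages : List (List (String × String))) : String :=
  "<conversation>\n" ++ pvAGo messages 1 ++ "</conversation>"

-- ===== PORT B =====
-- pass 1: the for-loop with the pending-user state, collecting (user, assistant) pairs
def pvBPairs : List (List (String × String)) → Option String → List (String × String)
  | [], none => []
  | [], some u => [(u, "")]
  | m :: rest, pending =>
    let role := PySem.Str.upper ((PySem.Dict.ofList m).getD "role" "")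
    let c := (PySem.Dict.ofList m).getD "content" ""
    match pending with
    | some u =>
      if role = "ASSISTANT" then (u, c) :: pvBPairs rest none
      else (u, "") :: pvBPairs rest (if role = "USER" then some c else none)
    | none => pvBPairs rest (if role = "USER" then some c else none)

-- the generator's f-string for one enumerated pair
def pvBRenderOne (np : Int × (String × String)) : String :=
  "  <turn_" ++ PySem.Int.toStr np.1 ++ ">\n    <user>" ++ np.2.1 ++ "</user>\n" ++
  "    <assistant>" ++ np.2.2 ++ "</assistant>\n  </turn_" ++ PySem.Int.toStr np.1 ++ ">\n"

-- pass 2: "".join over enumerate(pairs, 1)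
def format_messages_for_prompt_alt (messages : List (List (String × String))) : String :=
  "<conversation>\n" ++
    String.join ((PySem.List.enumerate (pvBPairs messages none) 1).map pvBRenderOne) ++
    "</conversation>"

-- ===== PRECONDITION & SPEC =====
def Spec_format_messages_for_prompt (messages : List (List (String × String))) (out : String) : Prop := out = format_messages_for_prompt_alt messages
instance (messages : List (List (String × String))) (out : String) : Decidable (Spec_format_messages_for_prompt messages out) := by unfold Spec_format_messages_for_prompt; infer_instance

-- ===== CLAIM (what is proved, stated in full; the proofs are below) =====
def Claim_equal_format_messages_for_prompt : Prop := ∀ (messages : List (List (String × String))), Dom_format_messages_for_prompt messages → Spec_format_messages_for_prompt messages (format_messages_for_prompt messages)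

-- ===== LEMMAS AND PROOFS =====

-- rendering from a given starting turn number, recursively
def pvRenderFrom (t : Int) : List (String × String) → String
  | [] => ""
  | p :: ps => pvATurn t p.1 p.2 ++ pvRenderFrom (t + 1) ps

theorem pv_foldl_join (l : List String) : ∀ s, List.foldl (fun r t => r ++ t) s l = s ++ String.join l := by
  induction l with
  | nil => intro s; simp [String.join]
  | cons a l ih =>
    intro s
    have h2 : String.join (a :: l) = a ++ String.join l := by
      rw [String.join, List.foldl_cons, ih]
      simp
    rw [List.foldl_cons, ih, h2, String.append_assoc]

theorem pv_join_cons (s : String) (l : List String) :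
    String.join (s :: l) = s ++ String.join l := by
  rw [String.join, List.foldl_cons, pv_foldl_join]
  simp

theorem pvBRenderOne_eq (t : Int) (p : String × String) :
    pvBRenderOne (t, p) = pvATurn t p.1 p.2 := by
  unfold pvBRenderOne pvATurn
  apply String.toList_injective
  simp [String.toList_append]

theorem join_enumerate_eq_renderFrom : ∀ (ps : List (String × String)) (t : Int),
    String.join ((PySem.List.enumerate ps t).map pvBRenderOne) = pvRenderFrom t ps := by
  intro ps
  induction ps with
  | nil => intro t; simp [PySem.List.enumerate_nil, pvRenderFrom, String.join]
  | cons p ps ih =>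
    intro t
    rw [PySem.List.enumerate_cons, List.map_cons, pv_join_cons, ih, pvBRenderOne_eq]
    rw [pvRenderFrom]

theorem pvAGo_eq_renderFrom : ∀ (n : Nat) (msgs : List (List (String × String))),
    msgs.length ≤ n → ∀ (turn : Int),
    pvAGo msgs turn = pvRenderFrom turn (pvBPairs msgs none) := by
  intro n
  induction n with
  | zero =>
    intro msgs h turn
    have hm : msgs = [] := List.eq_nil_of_length_eq_zero (Nat.le_zero.mp h)
    subst hm
    simp [pvAGo, pvBPairs, pvRenderFrom]
  | succ n ih =>
    intro msgs h turn
    match msgs with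
    | [] => simp [pvAGo, pvBPairs, pvRenderFrom]
    | m :: rest =>
      rw [pvAGo]
      by_cases hrole : PySem.Str.upper ((PySem.Dict.ofList m).getD "role" "") = "USER"
      · simp only [hrole, if_true]
        match rest with
        | [] =>
          simp [pvAGo, pvBPairs, hrole, pvRenderFrom]
        | m2 :: rest2 =>
          by_cases h2 : PySem.Str.upper ((PySem.Dict.ofList m2).getD "role" "") = "ASSISTANT"
          · have hlen : rest2.length ≤ n := by simp at h; omega
            simp [pvBPairs, hrole, h2, pvRenderFrom, ih rest2 hlen (turn + 1)]
          · have hlen : (m2 :: rest2).length ≤ n := by simp at h; simp; omega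
            have hrec := ih (m2 :: rest2) hlen (turn + 1)
            rw [pvBPairs] at hrec
            simp [pvBPairs, hrole, h2, pvRenderFrom, hrec]
      · have hlen : rest.length ≤ n := by simp at h; omega
        simp [pvBPairs, hrole, ih rest hlen turn]

-- ===== VERDICT (by name: the statement is the Claim_ definition above) =====
theorem format_messages_for_prompt_spec : Claim_equal_format_messages_for_prompt := by
  intro messages _
  unfold Spec_format_messages_for_prompt format_messages_for_prompt format_messages_for_prompt_alt
  rw [pvAGo_eq_renderFrom messages.length messages (Nat.le_refl _),
      join_enumerate_eq_renderFrom]
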